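-- pv_equiv track=rewrite | github.com/undefined996/dify-docs | tools/translate/derive-termbase.py | generate_termbase
-- ===== SOURCE A (Python) =====
-- STATIC_FOOTER = """
-- ## General Guidelines
--
-- Technical accuracy, English identifiers preserved, markdown formatting
-- maintained, professional tone.
-- """
--
-- def generate_termbase(top_sections: list[tuple[str, list[tuple[str, list[list[str]]]]]]) -> str:
--     """Generate lean termbase markdown from parsed sections."""
--     lines = ["# Terminology Database", ""]
--
--     for h2_heading, h3_groups in top_sections:
--         lines.append(f"## {h2_heading}")
--         lines.append("")
--         for h3_heading, rows in h3_groups: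
--             lines.append(f"### {h3_heading}")
--             lines.append("")
--             lines.append("| English | Chinese | Japanese |")
--             lines.append("|:--------|:--------|:---------|")
--             for english, chinese, japanese in rows:
--                 lines.append(f"| {english} | {chinese} | {japanese} |")
--             lines.append("")
--
--     lines.append(STATIC_FOOTER.strip())
--     lines.append("")
--
--     return "\n".join(lines)
-- ===== SOURCE B (Python) =====
-- STATIC_FOOTER = """
-- ## General Guidelines
--
-- Technical accuracy, English identifiers preserved, markdown formatting
-- maintained, professional tone.
-- """
--
--
-- def _render(ev):
--     """Rendering pass: one flat event -> its markdown lines."""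
--     kind, payload = ev
--     if kind == "h2":
--         return ["## " + payload, ""]
--     if kind == "h3":
--         return ["### " + payload, "",
--                 "| English | Chinese | Japanese |",
--                 "|:--------|:--------|:---------|"]
--     if kind == "row":
--         english, chinese, japanese = payload
--         return [f"| {english} | {chinese} | {japanese} |"]
--     return [""]  # "end": blank line closing an h3 table
--
--
-- def generate_termbase(top_sections: list[tuple[str, list[tuple[str, list[list[str]]]]]]) -> str:
--     """Generate lean termbase markdown via a flat event stream + a rendering pass."""
--     # Stage 1: flatten the nested structure into a linear stream of tagged events.
--     events = [ev
--               for h2_heading, h3_groups in top_sections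
--               for ev in [("h2", h2_heading)]
--               + [e for h3_heading, rows in h3_groups
--                  for e in [("h3", h3_heading)]
--                  + [("row", r) for r in rows]
--                  + [("end", None)]]]
--     # Stage 2: render each event independently and join.
--     lines = (["# Terminology Database", ""]
--              + [line for ev in events for line in _render(ev)]
--              + [STATIC_FOOTER.strip(), ""])
--     return "\n".join(lines)
-- ===== Notes on version B (the rewrite author's own statement) =====
-- stated objective: alternative
-- what changed: B is a two-stage pipeline: it first flattens the nested sections into a linear stream of tagged events (h2/h3/row/end), then a separate context-free rendering pass maps each event to its markdown lines, instead of A's single nested traversal appending formatted lines directly to one mutable list.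
import Mathlib
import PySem

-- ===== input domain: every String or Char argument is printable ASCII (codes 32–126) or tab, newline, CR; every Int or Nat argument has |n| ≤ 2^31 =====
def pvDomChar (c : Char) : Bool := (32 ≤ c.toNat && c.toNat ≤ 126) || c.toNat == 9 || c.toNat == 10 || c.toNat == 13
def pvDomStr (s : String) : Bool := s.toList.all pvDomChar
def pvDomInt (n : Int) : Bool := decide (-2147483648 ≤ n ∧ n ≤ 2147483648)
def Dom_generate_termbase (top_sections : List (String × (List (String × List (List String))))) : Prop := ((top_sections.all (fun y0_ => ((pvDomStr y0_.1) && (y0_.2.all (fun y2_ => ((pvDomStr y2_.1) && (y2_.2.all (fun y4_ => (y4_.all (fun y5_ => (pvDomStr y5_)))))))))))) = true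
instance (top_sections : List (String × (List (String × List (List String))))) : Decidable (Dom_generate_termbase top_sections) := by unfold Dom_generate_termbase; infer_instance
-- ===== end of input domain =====

-- ===== PORT A =====
-- B replaces A's direct nested line-appending traversal by a two-stage pipeline
-- (flat tagged event stream, then a context-free rendering pass); same output, same cost.
def pvFooter : String := "\n## General Guidelines\n\nTechnical accuracy, English identifiers preserved, markdown formatting\nmaintained, professional tone.\n"

-- 'for english, chinese, japanese in rows': Python raises ValueError unless the row has
-- exactly 3 items; Pre_ excludes other rows, the port returns "" there (unreachable under Pre_).
def pvRowLineA (row : List String) : String :=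
  match row with
  | [english, chinese, japanese] => "| " ++ english ++ " | " ++ chinese ++ " | " ++ japanese ++ " |"
  | _ => ""

def generate_termbase (top_sections : List (String × (List (String × List (List String))))) : String :=
  let lines : List String := ["# Terminology Database", ""]
  let lines := top_sections.foldl (fun lines p =>
    let lines := lines ++ ["## " ++ p.1, ""]
    p.2.foldl (fun lines q =>
      let lines := lines ++ ["### " ++ q.1, "", "| English | Chinese | Japanese |", "|:--------|:--------|:---------|"]
      let lines := q.2.foldl (fun lines row => lines ++ [pvRowLineA row]) lines
      lines ++ [""]) lines) lines
  let lines := lines ++ [PySem.Str.strip pvFooter, ""]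
  PySem.Str.join "\n" lines

-- ===== PORT B =====
-- the tagged events of Source B's stage 1 (("h2",s) / ("h3",s) / ("row",r) / ("end",None))
inductive PvEv : Type
  | h2 : String → PvEv
  | h3 : String → PvEv
  | row : List String → PvEv
  | hend : PvEv
deriving DecidableEq, Repr

-- stage 1: flatten the nested structure into a linear event stream (the comprehension in Source B)
def pvEvents (top_sections : List (String × (List (String × List (List String))))) : List PvEv :=
  top_sections.flatMap (fun p =>
    [PvEv.h2 p.1]
      ++ p.2.flatMap (fun q =>
        [PvEv.h3 q.1] ++ q.2.map PvEv.row ++ [PvEv.hend]))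

-- stage 2: _render of Source B; the row case mirrors Python's 3-way unpack (ValueError outside Pre_)
def pvRender (ev : PvEv) : List String :=
  match ev with
  | PvEv.h2 s => ["## " ++ s, ""]
  | PvEv.h3 s => ["### " ++ s, "", "| English | Chinese | Japanese |", "|:--------|:--------|:---------|"]
  | PvEv.row r =>
      match r with
      | [english, chinese, japanese] => ["| " ++ english ++ " | " ++ chinese ++ " | " ++ japanese ++ " |"]
      | _ => [""]
  | PvEv.hend => [""]

def generate_termbase_alt (top_sections : List (String × (List (String × List (List String))))) : String :=
  PySem.Str.join "\n"
    (["# Terminology Database", ""]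
      ++ (pvEvents top_sections).flatMap pvRender
      ++ [PySem.Str.strip pvFooter, ""])

-- ===== PRECONDITION & SPEC =====
-- Pre_ excludes exactly the inputs where some row does not have 3 cells: there Python's
-- 3-way tuple unpacking raises ValueError (in A and in B alike).
def Pre_generate_termbase (top_sections : List (String × (List (String × List (List String))))) : Prop :=
  (top_sections.all (fun p => p.2.all (fun q => q.2.all (fun row => row.length == 3)))) = true
instance (top_sections : List (String × (List (String × List (List String))))) : Decidable (Pre_generate_termbase top_sections) := by unfold Pre_generate_termbase; infer_instance

def pvWitness_generate_termbase : (List (String × (List (String × List (List String))))) :=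
  [("Core", [("UI", [["app", "ying", "apuri"]])])]

def Spec_generate_termbase (top_sections : List (String × (List (String × List (List String))))) (out : String) : Prop := out = generate_termbase_alt top_sections
instance (top_sections : List (String × (List (String × List (List String))))) (out : String) : Decidable (Spec_generate_termbase top_sections out) := by unfold Spec_generate_termbase; infer_instance

-- ===== CLAIM (what is proved, stated in full; the proofs are below) =====
def Claim_equal_generate_termbase : Prop := ∀ (top_sections : List (String × (List (String × List (List String))))), Dom_generate_termbase top_sections → Pre_generate_termbase top_sections → Spec_generate_termbase top_sections (generate_termbase top_sections)

-- ===== LEMMAS AND PROOFS =====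

-- the flat line lists A accumulates, per h3 group and per h2 section
def pvGroupLines (q : String × List (List String)) : List String :=
  ["### " ++ q.1, "", "| English | Chinese | Japanese |", "|:--------|:--------|:---------|"]
    ++ q.2.map pvRowLineA ++ [""]

def pvSectionLines (p : String × List (String × List (List String))) : List String :=
  ["## " ++ p.1, ""] ++ p.2.flatMap pvGroupLines

lemma flatten_singletons {α β : Type} (f : α → β) (l : List α) :
    (List.map (fun x => [f x]) l).flatten = List.map f l := by
  induction l with
  | nil => simp
  | cons a l ih => simp [ih]

lemma sections_foldl (ts : List (String × (List (String × List (List String))))) (acc : List String) :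
    ts.foldl (fun lines p =>
      p.2.foldl (fun lines q =>
        (q.2.foldl (fun lines row => lines ++ [pvRowLineA row])
          (lines ++ ["### " ++ q.1, "", "| English | Chinese | Japanese |", "|:--------|:--------|:---------|"])) ++ [""])
        (lines ++ ["## " ++ p.1, ""])) acc
    = acc ++ ts.flatMap pvSectionLines := by
  induction ts generalizing acc with
  | nil => simp
  | cons t tsr ih =>
      rw [List.foldl_cons, ih, List.flatMap_cons]
      simp [pvSectionLines, List.flatMap, flatten_singletons]
      rfl

lemma render_row_eq (r : List String) : pvRender (PvEv.row r) = [pvRowLineA r] := by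
  cases r with
  | nil => rfl
  | cons a r => cases r with
    | nil => rfl
    | cons b r => cases r with
      | nil => rfl
      | cons c r => cases r with
        | nil => rfl
        | cons d r => rfl

lemma render_group (q : String × List (List String)) :
    ([PvEv.h3 q.1] ++ q.2.map PvEv.row ++ [PvEv.hend]).flatMap pvRender = pvGroupLines q := by
  have h : List.map (pvRender ∘ PvEv.row) q.2 = List.map (fun r => [pvRowLineA r]) q.2 :=
    List.map_congr_left (fun r _ => render_row_eq r)
  simp [pvGroupLines, pvRender, List.flatMap, List.map_map, h, flatten_singletons]

lemma render_events (ts : List (String × (List (String × List (List String))))) :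
    (pvEvents ts).flatMap pvRender = ts.flatMap pvSectionLines := by
  induction ts with
  | nil => rfl
  | cons t tsr ih =>
      simp only [pvEvents, List.flatMap_cons] at *
      rw [List.flatMap_append, ih, pvSectionLines]
      congr 1
      rw [List.flatMap_append]
      simp only [List.flatMap_cons, List.flatMap_nil, List.append_nil, pvRender]
      congr 1
      induction t.2 with
      | nil => rfl
      | cons g gs ihg =>
          rw [List.flatMap_cons, List.flatMap_append, ihg, List.flatMap_cons, render_group]

theorem pv_main (ts : List (String × (List (String × List (List String))))) :
    generate_termbase ts = generate_termbase_alt ts := by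
  show PySem.Str.join "\n"
      ((ts.foldl _ ["# Terminology Database", ""]) ++ [PySem.Str.strip pvFooter, ""])
    = _
  rw [sections_foldl, generate_termbase_alt, render_events, List.append_assoc]

-- ===== VERDICT (by name: the statement is the Claim_ definition above) =====
theorem generate_termbase_spec : Claim_equal_generate_termbase := by
  intro ts _ _
  exact pv_main ts
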